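-- pv_equiv track=rewrite | github.com/ciromattia/kcc | kindlecomicconverter/rarfile.py | _inc_volname
-- ===== SOURCE A (Python) =====
-- def _inc_volname(volfile, i):
--     fn = list(volfile)
--     while i >= 0:
--         if fn[i] != '9':
--             fn[i] = chr(ord(fn[i]) + 1)
--             break
--         fn[i] = '0'
--         i -= 1
--     return ''.join(fn)
-- ===== SOURCE B (Python) =====
-- def _inc_volname(volfile, i):
--     if i < 0:
--         return volfile
--     prefix = volfile[:i + 1]
--     stripped = prefix.rstrip('9')
--     carried = len(prefix) - len(stripped)
--     if stripped:
--         bumped = stripped[:-1] + chr(ord(stripped[-1]) + 1)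
--     else:
--         bumped = ''
--     return bumped + '0' * carried + volfile[i + 1:]
-- ===== Notes on version B (the rewrite author's own statement) =====
-- stated objective: alternative
-- what changed: A walks a char list in a mutating carry loop; B has no loop at all: it slices the prefix, strips the trailing run of '9's with rstrip, increments the single preceding character and pads with zeros.
import Mathlib
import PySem

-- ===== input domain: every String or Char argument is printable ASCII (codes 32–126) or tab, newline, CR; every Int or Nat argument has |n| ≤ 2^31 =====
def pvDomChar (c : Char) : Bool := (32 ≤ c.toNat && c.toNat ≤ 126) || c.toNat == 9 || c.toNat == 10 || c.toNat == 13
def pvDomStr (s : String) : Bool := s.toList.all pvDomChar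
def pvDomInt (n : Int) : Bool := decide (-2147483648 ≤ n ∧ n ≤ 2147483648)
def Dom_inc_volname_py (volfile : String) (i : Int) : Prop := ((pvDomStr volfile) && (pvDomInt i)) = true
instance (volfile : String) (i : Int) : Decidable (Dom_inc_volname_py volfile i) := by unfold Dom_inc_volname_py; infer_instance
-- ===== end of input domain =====

-- B replaces A's mutating carry loop by a loop-free slice/rstrip/pad decomposition (objective: alternative, same cost).

-- ===== PORT A =====
-- the while-loop: i decreases by 1 each carry step, stops on break, on i < 0, or (IndexError, outside Pre_) on fn[i]
def incAGo (fn : List Char) (i : Int) : List Char :=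
  if _h : 0 ≤ i then
    match PySem.List.pyGet? fn i with
    | none => fn            -- Python raises IndexError here; excluded by Pre_
    | some c =>
      if c ≠ '9' then fn.set i.toNat (Char.ofNat (c.toNat + 1))   -- fn[i] = chr(ord(fn[i]) + 1); break
      else incAGo (fn.set i.toNat '0') (i - 1)                    -- fn[i] = '0'; i -= 1
  else fn
termination_by (i + 1).toNat
decreasing_by omega

def inc_volname_py (volfile : String) (i : Int) : String :=
  String.ofList (incAGo volfile.toList i)        -- fn = list(volfile) … return ''.join(fn)

-- ===== PORT B =====
def inc_volname_py_alt (volfile : String) (i : Int) : String :=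
  if i < 0 then volfile
  else
    let cs := volfile.toList
    let pre := PySem.List.slice cs none (some (i + 1))            -- volfile[:i+1]
    -- prefix.rstrip('9') drops exactly the maximal trailing run of '9's: List.rdropWhile is exact here
    let stripped := List.rdropWhile (· == '9') pre
    let carried := pre.length - stripped.length
    let bumped :=
      match stripped.getLast? with                                -- 'if stripped:'
      | none => []
      | some c => stripped.dropLast ++ [Char.ofNat (c.toNat + 1)] -- stripped[:-1] + chr(ord(stripped[-1])+1)
    String.ofList (bumped ++ List.replicate carried '0' ++ PySem.List.slice cs (some (i + 1)) none)

-- ===== PRECONDITION & SPEC =====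
-- Pre_ excludes exactly i ≥ len(volfile), where A's fn[i] raises IndexError (for any i < len, including negative i, A returns).
def Pre_inc_volname_py (volfile : String) (i : Int) : Prop := i < (volfile.toList.length : Int)
instance (volfile : String) (i : Int) : Decidable (Pre_inc_volname_py volfile i) := by unfold Pre_inc_volname_py; infer_instance

def pvWitness_inc_volname_py : String × Int := ("v09", 2)

def Spec_inc_volname_py (volfile : String) (i : Int) (out : String) : Prop := out = inc_volname_py_alt volfile i
instance (volfile : String) (i : Int) (out : String) : Decidable (Spec_inc_volname_py volfile i out) := by unfold Spec_inc_volname_py; infer_instance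

-- ===== CLAIM (what is proved, stated in full; the proofs are below) =====
def Claim_equal_inc_volname_py : Prop := ∀ (volfile : String) (i : Int), Dom_inc_volname_py volfile i → Pre_inc_volname_py volfile i → Spec_inc_volname_py volfile i (inc_volname_py volfile i)

-- ===== LEMMAS AND PROOFS =====

-- B's list-level result at a Nat index
def pvBump (fn : List Char) (n : Nat) : List Char :=
  (match (List.rdropWhile (· == '9') (fn.take (n + 1))).getLast? with
   | none => []
   | some c => (List.rdropWhile (· == '9') (fn.take (n + 1))).dropLast ++ [Char.ofNat (c.toNat + 1)])
  ++ List.replicate ((fn.take (n + 1)).length - (List.rdropWhile (· == '9') (fn.take (n + 1))).length) '0'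
  ++ fn.drop (n + 1)

lemma incAGo_neg (fn : List Char) (i : Int) (h : i < 0) : incAGo fn i = fn := by
  rw [incAGo]; simp [not_le.mpr h]

lemma take_set_self (fn : List Char) (n : Nat) (a : Char) :
    (fn.set n a).take n = fn.take n := by
  apply List.ext_getElem <;> simp [List.getElem_set]
  omega

lemma rdropWhile_length_le (l : List Char) :
    (List.rdropWhile (· == '9') l).length ≤ l.length := by
  have h1 := (List.dropWhile_sublist (p := (· == '9')) (l := l.reverse)).length_le
  rw [List.rdropWhile]
  simpa using h1

lemma incAGo_eq_pvBump (n : Nat) (fn : List Char) (h : n < fn.length) :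
    incAGo fn (n : Int) = pvBump fn n := by
  induction n generalizing fn with
  | zero =>
    rw [incAGo]
    have h0 : PySem.List.pyGet? fn (0 : Int) = some fn[0] := by
      simpa using PySem.List.pyGet?_ofNat fn 0 h
    simp only [show ((0:Nat) : Int) = (0 : Int) by norm_num] at *
    rw [h0]
    simp only [le_refl, dite_true, Int.toNat_zero]
    have htake : fn.take 1 = [fn[0]] := by
      rw [List.take_add_one]; simp [List.getElem?_eq_getElem h]
    by_cases h9 : fn[0] = '9'
    · simp only [h9, ne_eq, not_true_eq_false, ite_false]
      rw [incAGo_neg _ _ (by norm_num)]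
      rw [List.set_eq_take_cons_drop '0' h]
      rw [pvBump, htake, h9]
      simp [List.rdropWhile]
    · simp only [ne_eq, h9, not_false_iff, ite_true]
      rw [List.set_eq_take_cons_drop _ h]
      have hrd : List.rdropWhile (· == '9') [fn[0]] = [fn[0]] := by
        rw [show [fn[0]] = ([] : List Char) ++ [fn[0]] from rfl, List.rdropWhile_concat]
        simp [h9]
      rw [pvBump, htake, hrd]
      simp
  | succ m ih =>
    rw [incAGo]
    have h0 : PySem.List.pyGet? fn ((m + 1 : Nat) : Int) = some fn[m + 1] :=
      PySem.List.pyGet?_ofNat fn (m + 1) h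
    rw [h0]
    simp only [show (0:Int) ≤ ((m+1 : Nat) : Int) by omega, dite_true]
    have htoNat : (((m + 1 : Nat) : Int)).toNat = m + 1 := by omega
    have htake : fn.take (m + 1 + 1) = fn.take (m + 1) ++ [fn[m + 1]] := by
      rw [List.take_add_one]; simp [List.getElem?_eq_getElem h]
    have hlt : (fn.take (m + 1)).length = m + 1 := by
      rw [List.length_take]; omega
    by_cases h9 : fn[m + 1] = '9'
    · simp only [h9, ne_eq, not_true_eq_false, ite_false, htoNat]
      have hcast : ((m + 1 : Nat) : Int) - 1 = (m : Nat) := by push_cast; ring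
      rw [hcast]
      set fn' := fn.set (m + 1) '0' with hfn'
      have hlen' : m < fn'.length := by rw [hfn', List.length_set]; omega
      rw [ih fn' hlen']
      -- compare pvBump fn' m with pvBump fn (m+1)
      have hpre : fn'.take (m + 1) = fn.take (m + 1) := take_set_self fn (m + 1) '0'
      have hdrop : fn'.drop (m + 1) = '0' :: fn.drop (m + 1 + 1) := by
        rw [hfn', List.set_eq_take_cons_drop '0' h]
        rw [List.drop_append_of_le_length (by omega)]
        simp
      have hrd : List.rdropWhile (· == '9') (fn.take (m + 1 + 1))
          = List.rdropWhile (· == '9') (fn.take (m + 1)) := by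
        rw [htake, List.rdropWhile_concat]
        simp [h9]
      have hlenpre : (fn.take (m + 1 + 1)).length = (fn.take (m + 1)).length + 1 := by
        rw [List.length_take, List.length_take]; omega
      have hle := rdropWhile_length_le (fn.take (m + 1))
      rw [pvBump, pvBump, hpre, hdrop, hrd, hlenpre]
      have hrep : List.replicate ((fn.take (m+1)).length + 1 - (List.rdropWhile (· == '9') (fn.take (m+1))).length) '0'
          = List.replicate ((fn.take (m+1)).length - (List.rdropWhile (· == '9') (fn.take (m+1))).length) '0' ++ ['0'] := by
        rw [← List.replicate_succ']
        congr 1; omega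
      rw [hrep]
      simp
    · simp only [ne_eq, h9, not_false_iff, ite_true, htoNat]
      have hrd : List.rdropWhile (· == '9') (fn.take (m + 1 + 1))
          = fn.take (m + 1) ++ [fn[m + 1]] := by
        rw [htake, List.rdropWhile_concat]
        simp [h9]
      rw [List.set_eq_take_cons_drop _ h]
      rw [pvBump, hrd, htake]
      have hl : (fn.take (m + 1) ++ [fn[m + 1]]).length = m + 1 + 1 := by
        rw [List.length_append, hlt]; rfl
      rw [hl, Nat.sub_self]
      simp only [List.getLast?_concat, List.dropLast_concat, List.replicate_zero]
      simp

lemma alt_eq_pvBump (volfile : String) (n : Nat) :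
    inc_volname_py_alt volfile ((n : Nat) : Int) = String.ofList (pvBump volfile.toList n) := by
  unfold inc_volname_py_alt pvBump
  have hnn : ¬ (((n : Nat) : Int) < 0) := by omega
  simp only [hnn, ite_false]
  have h1 : ((n : Nat) : Int) + 1 = ((n + 1 : Nat) : Int) := by push_cast; ring
  rw [h1, PySem.List.slice_to_natCast, PySem.List.slice_from_natCast]

-- ===== VERDICT (by name: the statement is the Claim_ definition above) =====
theorem inc_volname_py_spec : Claim_equal_inc_volname_py := by
  intro volfile i _hDom hPre
  unfold Spec_inc_volname_py inc_volname_py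
  by_cases hneg : i < 0
  · rw [incAGo_neg _ _ hneg]
    unfold inc_volname_py_alt
    simp [hneg]
  · obtain ⟨n, rfl⟩ := Int.eq_ofNat_of_zero_le (not_lt.mp hneg)
    have hn : n < volfile.toList.length := by
      unfold Pre_inc_volname_py at hPre; exact_mod_cast hPre
    rw [incAGo_eq_pvBump n _ hn, alt_eq_pvBump]
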